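-- pv_equiv track=rewrite | github.com/JohnDorsey/PyCellEliminationRun | FibonacciCodeTools.py | getStopcodeLIndicesInEnbocode
-- ===== SOURCE A (Python) =====
-- def getStopcodeLIndicesInEnbocode(inputBitArr, order=None):
--   assert order > 1
--   stopcode = [1 for i in range(order)]
--   result = []
--   i = 0
--   while i+order <= len(inputBitArr):
--     if inputBitArr[i:i+order] == stopcode:
--       result.append(i)
--       i += order
--     else:
--       i += 1
--   return result
-- ===== SOURCE B (Python) =====
-- def getStopcodeLIndicesInEnbocode(inputBitArr, order=None):
--   assert order > 1
--   result = []
--   run = 0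
--   for i, bit in enumerate(inputBitArr):
--     run = run + 1 if bit == 1 else 0
--     if run == order:
--       result.append(i - order + 1)
--       run = 0
--   return result
-- ===== Notes on version B (the rewrite author's own statement) =====
-- stated objective: faster
-- what changed: Replaces the sliding-window slice comparison (a fresh length-order slice compared against [1]*order at each position) with a single pass that counts consecutive ones and records the run start when the count reaches order, resetting it to zero.
import Mathlib
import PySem

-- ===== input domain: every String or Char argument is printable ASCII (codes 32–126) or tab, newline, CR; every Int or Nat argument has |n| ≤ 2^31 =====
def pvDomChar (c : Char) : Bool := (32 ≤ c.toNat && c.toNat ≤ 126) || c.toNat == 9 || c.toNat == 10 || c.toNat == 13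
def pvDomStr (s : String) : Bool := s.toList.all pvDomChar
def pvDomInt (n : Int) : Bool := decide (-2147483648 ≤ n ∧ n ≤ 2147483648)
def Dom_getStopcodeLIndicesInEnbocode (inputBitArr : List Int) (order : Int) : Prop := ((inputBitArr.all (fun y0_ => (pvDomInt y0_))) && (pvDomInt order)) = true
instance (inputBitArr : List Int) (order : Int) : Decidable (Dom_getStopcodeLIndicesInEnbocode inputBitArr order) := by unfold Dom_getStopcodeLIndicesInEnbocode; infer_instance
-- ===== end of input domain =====

-- B replaces A's per-position slice-vs-[1]*order comparison (O(n*order)) by one pass that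
-- counts consecutive ones and resets the count when it reaches `order` (O(n)); objective: faster.

-- ===== PORT A =====
-- A's while loop; i : Nat (Python's i starts at 0 and only grows), order.toNat ≥ 1 is carried
-- as hypothesis `hord` only for termination.  xs[i:i+order] is PySem.List.slice.
def pvGoA (xs : List Int) (o : Nat) (stop : List Int) (hord : 1 ≤ o) (i : Nat) : List Int :=
  if h : i + o ≤ xs.length then
    if PySem.List.slice xs (some (i : Int)) (some ((i : Int) + (o : Int))) == stop then
      (i : Int) :: pvGoA xs o stop hord (i + o)
    else
      pvGoA xs o stop hord (i + 1)
  else []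
termination_by xs.length - i
decreasing_by all_goals omega

def getStopcodeLIndicesInEnbocode (inputBitArr : List Int) (order : Int) : List Int :=
  if h : 1 < order then
    -- stopcode = [1 for i in range(order)]
    pvGoA inputBitArr order.toNat (List.replicate order.toNat 1) (by omega) 0
  else []  -- `assert order > 1` raises AssertionError; excluded by Pre_

-- ===== PORT B =====
-- B's for loop over enumerate(inputBitArr): state = (index i, run counter, accumulated result).
def pvGoB (ord : Int) : List Int → Nat → Int → List Int → List Int
  | [], _, _, acc => acc
  | b :: t, i, r, acc =>
    let r' : Int := if b == 1 then r + 1 else 0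
    if r' == ord then pvGoB ord t (i + 1) 0 (acc ++ [(i : Int) - ord + 1])
    else pvGoB ord t (i + 1) r' acc

def getStopcodeLIndicesInEnbocode_alt (inputBitArr : List Int) (order : Int) : List Int :=
  if 1 < order then pvGoB order inputBitArr 0 0 []
  else []  -- `assert order > 1` raises AssertionError; excluded by Pre_

-- ===== PRECONDITION & SPEC =====
-- Pre_: both Pythons `assert order > 1` (AssertionError otherwise); exactly those inputs are excluded.
def Pre_getStopcodeLIndicesInEnbocode (inputBitArr : List Int) (order : Int) : Prop := 1 < order
instance (inputBitArr : List Int) (order : Int) : Decidable (Pre_getStopcodeLIndicesInEnbocode inputBitArr order) := by unfold Pre_getStopcodeLIndicesInEnbocode; infer_instance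
def pvWitness_getStopcodeLIndicesInEnbocode : List Int × Int := ([1, 1, 0, 1, 1], 2)

def Spec_getStopcodeLIndicesInEnbocode (inputBitArr : List Int) (order : Int) (out : List Int) : Prop := out = getStopcodeLIndicesInEnbocode_alt inputBitArr order
instance (inputBitArr : List Int) (order : Int) (out : List Int) : Decidable (Spec_getStopcodeLIndicesInEnbocode inputBitArr order out) := by unfold Spec_getStopcodeLIndicesInEnbocode; infer_instance

-- ===== CLAIM (what is proved, stated in full; the proofs are below) =====
def Claim_equal_getStopcodeLIndicesInEnbocode : Prop := ∀ (inputBitArr : List Int) (order : Int), Dom_getStopcodeLIndicesInEnbocode inputBitArr order → Pre_getStopcodeLIndicesInEnbocode inputBitArr order → Spec_getStopcodeLIndicesInEnbocode inputBitArr order (getStopcodeLIndicesInEnbocode inputBitArr order)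

-- ===== LEMMAS AND PROOFS =====

-- B's appended accumulator factors out.
lemma pvGoB_acc (ord : Int) (l : List Int) : ∀ (i : Nat) (r : Int) (acc : List Int),
    pvGoB ord l i r acc = acc ++ pvGoB ord l i r [] := by
  induction l with
  | nil => intro i r acc; simp [pvGoB]
  | cons b t ih =>
    intro i r acc
    simp only [pvGoB]
    split
    · split
      · rw [ih (i + 1) 0 (acc ++ [(i : Int) - ord + 1]), ih (i + 1) 0 ([] ++ [(i : Int) - ord + 1])]
        simp
      · exact ih (i + 1) _ acc
    · split
      · rw [ih (i + 1) 0 (acc ++ [(i : Int) - ord + 1]), ih (i + 1) 0 ([] ++ [(i : Int) - ord + 1])]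
        simp
      · exact ih (i + 1) _ acc

-- a window of known ones equals the stopcode
lemma pv_window_ones (xs : List Int) (o j : Nat) (hjo : j + o ≤ xs.length)
    (hones : ∀ k, j ≤ k → k < j + o → xs.getD k 0 = 1) :
    (xs.drop j).take o = List.replicate o 1 := by
  apply List.ext_getElem
  · simp; omega
  · intro k h1 h2
    simp only [List.getElem_take, List.getElem_drop, List.getElem_replicate]
    have hk : j + k < xs.length := by simp at h1; omega
    have := hones (j + k) (by omega) (by simp at h1; omega)
    rwa [List.getD_eq_getElem _ _ hk] at this

-- A's scan skips one-by-one past a non-one bit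
lemma pvGoA_skip (xs : List Int) (o : Nat) (hord : 1 ≤ o) (i : Nat)
    (hi : i < xs.length) (hbit : xs[i] ≠ 1) :
    ∀ d j, i + 1 - j ≤ d → j ≤ i → i < j + o →
      pvGoA xs o (List.replicate o 1) hord j = pvGoA xs o (List.replicate o 1) hord (i + 1) := by
  intro d
  induction d with
  | zero => intro j h1 h2 h3; omega
  | succ d ih =>
    intro j h1 h2 h3
    rw [pvGoA]
    split
    · rename_i h
      have hslice : PySem.List.slice xs (some (j : Int)) (some ((j : Int) + (o : Int)))
          = (xs.drop j).take o := PySem.List.slice_natCast_add xs j o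
      have hne : ((xs.drop j).take o == List.replicate o 1) = false := by
        rw [beq_eq_false_iff_ne]
        intro heq
        have hv : ((xs.drop j).take o)[i - j]? = some 1 := by
          rw [heq, List.getElem?_replicate]
          simp [show i - j < o by omega]
        have h2v : ((xs.drop j).take o)[i - j]? = xs[i]? := by
          simp [List.getElem?_drop, show i - j < o by omega,
            show j + (i - j) = i by omega]
        rw [h2v, List.getElem?_eq_getElem hi] at hv
        simp only [Option.some.injEq] at hv
        exact hbit hv
      rw [hslice, hne]
      simp only [Bool.false_eq_true, if_false]
      by_cases hji : j = i
      · rw [hji]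
      · exact ih (j + 1) (by omega) (by omega) (by omega)
    · rename_i h
      rw [pvGoA, dif_neg (by omega)]

-- Main invariant: with r < o trailing ones just before position i, B's scan from i with
-- counter r computes what A's scan computes from position i - r.
lemma pv_main (xs : List Int) (o : Nat) (ho : 1 ≤ o) :
    ∀ d i r, xs.length - i ≤ d → r ≤ i → r < o → i ≤ xs.length →
      (∀ k, i - r ≤ k → k < i → xs.getD k 0 = 1) →
      pvGoB (o : Int) (xs.drop i) i (r : Int) [] = pvGoA xs o (List.replicate o 1) ho (i - r) := by
  intro d
  induction d with
  | zero =>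
    intro i r h1 h2 h3 h4 h5
    have hi : i = xs.length := by omega
    rw [List.drop_of_length_le (by omega)]
    rw [pvGoA, dif_neg (by omega)]
    simp [pvGoB]
  | succ d ih =>
    intro i r h1 h2 h3 h4 h5
    by_cases hil : i < xs.length
    · have hdrop : xs.drop i = xs[i] :: xs.drop (i + 1) := by
        rw [List.drop_eq_getElem_cons hil]
      rw [hdrop]
      simp only [pvGoB]
      by_cases hb : xs[i] = 1
      · have hbt : (xs[i] == 1) = true := by simp [hb]
        simp only [hbt, if_true]
        by_cases hro : r + 1 = o
        · have hcond : (((r : Int) + 1) == (o : Int)) = true := by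
            simp; exact_mod_cast hro
          simp only [hcond, if_true]
          rw [pvGoB_acc]
          have hrec := ih (i + 1) 0 (by omega) (by omega) (by omega) (by omega)
            (by intro k hk1 hk2; omega)
          simp only [Nat.cast_zero] at hrec
          -- RHS: window at i - r matches
          have hslice : PySem.List.slice xs (some ((i - r : Nat) : Int)) (some (((i - r : Nat) : Int) + (o : Int)))
              = (xs.drop (i - r)).take o := PySem.List.slice_natCast_add xs (i - r) o
          have hw : (xs.drop (i - r)).take o = List.replicate o 1 := by
            apply pv_window_ones xs o (i - r) (by omega)
            intro k hk1 hk2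
            by_cases hki : k < i
            · exact h5 k hk1 hki
            · have : k = i := by omega
              rw [this, List.getD_eq_getElem _ _ hil]; exact hb
          have hR : pvGoA xs o (List.replicate o 1) ho (i - r)
              = ((i - r : Nat) : Int) :: pvGoA xs o (List.replicate o 1) ho (i - r + o) := by
            rw [pvGoA, dif_pos (by omega), hslice, hw]
            simp
          simp only [Nat.sub_zero] at hrec
          rw [hrec, hR]
          have hidx : ((i - r : Nat) : Int) = (i : Int) - (o : Int) + 1 := by omega
          have hstep : i - r + o = i + 1 := by omega
          rw [hstep, hidx]
          simp
        · have hcond : (((r : Int) + 1) == (o : Int)) = false := by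
            rw [beq_eq_false_iff_ne]
            intro hc; apply hro; exact_mod_cast hc
          simp only [hcond, Bool.false_eq_true, if_false]
          have hcast : (r : Int) + 1 = ((r + 1 : Nat) : Int) := by push_cast; ring
          rw [hcast]
          have hrec := ih (i + 1) (r + 1) (by omega) (by omega) (by omega) (by omega)
            (by
              intro k hk1 hk2
              by_cases hki : k < i
              · exact h5 k (by omega) hki
              · have : k = i := by omega
                rw [this, List.getD_eq_getElem _ _ hil]; exact hb)
          rw [hrec]
          have : i + 1 - (r + 1) = i - r := by omega
          rw [this]
      · have hbt : (xs[i] == 1) = false := by simp [hb]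
        simp only [hbt, Bool.false_eq_true, if_false]
        have hcond : ((0 : Int) == (o : Int)) = false := by
          rw [beq_eq_false_iff_ne]; intro hc; omega
        simp only [hcond, Bool.false_eq_true, if_false]
        have hrec := ih (i + 1) 0 (by omega) (by omega) (by omega) (by omega)
          (by intro k hk1 hk2; omega)
        simp only [Nat.cast_zero] at hrec
        rw [hrec]
        exact (pvGoA_skip xs o ho i hil hb (i + 1) (i - r) (by omega) (by omega) (by omega)).symm
    · have hi : i = xs.length := by omega
      rw [List.drop_of_length_le (by omega)]
      rw [pvGoA, dif_neg (by omega)]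
      simp [pvGoB]

-- ===== VERDICT (by name: the statement is the Claim_ definition above) =====
theorem getStopcodeLIndicesInEnbocode_spec : Claim_equal_getStopcodeLIndicesInEnbocode := by
  intro xs order hdom hpre
  have h1 : 1 < order := hpre
  unfold Spec_getStopcodeLIndicesInEnbocode getStopcodeLIndicesInEnbocode getStopcodeLIndicesInEnbocode_alt
  rw [dif_pos h1, if_pos h1]
  have ho : ((order.toNat : Nat) : Int) = order := Int.toNat_of_nonneg (by omega)
  have := (pv_main xs order.toNat (by omega) xs.length 0 0 (by omega) (by omega) (by omega)
    (by omega) (by intro k hk1 hk2; omega)).symm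
  simp only [List.drop_zero, Nat.cast_zero, Nat.sub_zero] at this
  rw [ho] at this
  exact this
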